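-- pv_equiv track=rewrite | github.com/raghu1199/Python_Fundamentals-01 | Basic_Programs/sum_is_5_list.py | sum_num
-- ===== SOURCE A (Python) =====
-- def sum_num(num,req_sum):
--     li=list()
--     sum=0
--     for i in range(len(num)-2):
--         for j in range(i+1,len(num)):
--             for k in range(j+1,len(num)):
--                 a=num[i]
--                 b=num[j]
--                 c=num[k]
--                 sum=a+b+c
--                 if sum==req_sum:
--                     s1=[a,b,c]
--                     li.append(s1)
--     return li
-- ===== SOURCE B (Python) =====
-- def sum_num(num, req_sum):
--     # O(n^2): for each pair (i, j), a running suffix counter gives the number of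
--     # valid k > j in O(1) instead of A's inner k-scan.
--     n = len(num)
--     res = []
--     for i in range(n - 2):
--         a = num[i]
--         cnt = {}
--         seg = []
--         for j in range(n - 1, i, -1):
--             b = num[j]
--             t = req_sum - a - b
--             seg = [[a, b, t]] * cnt.get(t, 0) + seg
--             cnt[b] = cnt.get(b, 0) + 1
--         res += seg
--     return res
-- ===== Notes on version B (the rewrite author's own statement) =====
-- stated objective: faster
-- what changed: A's innermost scan over k is removed: B keeps, per i, a running suffix counter dict while walking j downward, so each pair (i, j) contributes its chunk of triples via one dict lookup instead of a full k-loop.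
import Mathlib
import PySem

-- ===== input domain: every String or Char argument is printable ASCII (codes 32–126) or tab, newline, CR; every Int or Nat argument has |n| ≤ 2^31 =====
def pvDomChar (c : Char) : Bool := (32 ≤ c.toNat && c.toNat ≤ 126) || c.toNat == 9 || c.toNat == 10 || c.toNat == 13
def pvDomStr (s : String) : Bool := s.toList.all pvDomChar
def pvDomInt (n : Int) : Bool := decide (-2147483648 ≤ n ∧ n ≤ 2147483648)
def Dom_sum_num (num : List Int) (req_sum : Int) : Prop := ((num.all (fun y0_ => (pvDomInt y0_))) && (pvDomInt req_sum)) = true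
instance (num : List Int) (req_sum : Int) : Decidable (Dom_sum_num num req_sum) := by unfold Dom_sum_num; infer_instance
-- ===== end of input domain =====

-- B replaces A's innermost k-scan by a running suffix counter per (i, j) pair: O(n^2) pair work instead of O(n^3).

-- ===== PORT A =====
-- A: triple nested index loops, appending [a, b, c] whenever a + b + c == req_sum.
def sum_num (num : List Int) (req_sum : Int) : List (List Int) :=
  (PySem.List.pyRange 0 (PySem.List.len num - 2)).foldl (fun li i =>
    (PySem.List.pyRange (i + 1) (PySem.List.len num)).foldl (fun li j =>
      (PySem.List.pyRange (j + 1) (PySem.List.len num)).foldl (fun li k =>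
        if PySem.List.pyGetD num i 0 + PySem.List.pyGetD num j 0 + PySem.List.pyGetD num k 0 = req_sum
        then li ++ [[PySem.List.pyGetD num i 0, PySem.List.pyGetD num j 0, PySem.List.pyGetD num k 0]]
        else li) li) li) []

-- ===== PORT B =====
-- B: for each i, walk j downward keeping a dict cnt of the values after j; the number of valid k
-- for the pair (i, j) is cnt.get(req_sum - a - b, 0), and the chunks are prepended to keep A's order.
def sum_num_alt (num : List Int) (req_sum : Int) : List (List Int) :=
  (PySem.List.pyRange 0 (PySem.List.len num - 2)).foldl (fun res i =>
    res ++
      ((PySem.List.pyRange (PySem.List.len num - 1) i (-1)).foldl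
        (fun (st : PySem.Dict Int Int × List (List Int)) j =>
          (st.1.insert (PySem.List.pyGetD num j 0) (st.1.getD (PySem.List.pyGetD num j 0) 0 + 1),
           List.replicate (st.1.getD (req_sum - PySem.List.pyGetD num i 0 - PySem.List.pyGetD num j 0) 0).toNat
               [PySem.List.pyGetD num i 0, PySem.List.pyGetD num j 0,
                req_sum - PySem.List.pyGetD num i 0 - PySem.List.pyGetD num j 0]
             ++ st.2))
        (PySem.Dict.empty, [])).2) []

-- ===== PRECONDITION & SPEC =====
def Spec_sum_num (num : List Int) (req_sum : Int) (out : List (List Int)) : Prop := out = sum_num_alt num req_sum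
instance (num : List Int) (req_sum : Int) (out : List (List Int)) : Decidable (Spec_sum_num num req_sum out) := by unfold Spec_sum_num; infer_instance

-- ===== CLAIM (what is proved, stated in full; the proofs are below) =====
def Claim_equal_sum_num : Prop := ∀ (num : List Int) (req_sum : Int), Dom_sum_num num req_sum → Spec_sum_num num req_sum (sum_num num req_sum)

-- ===== LEMMAS AND PROOFS =====

-- the running counter dict: fold of cnt[x] = cnt.get(x, 0) + 1
def pvCdict (l : List Int) : PySem.Dict Int Int :=
  l.foldl (fun d x => d.insert x (d.getD x 0 + 1)) PySem.Dict.empty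

lemma pvCdict_getD (l : List Int) (v : Int) : (pvCdict l).getD v 0 = (l.count v : Int) := by
  simp [pvCdict, PySem.Dict.getD_foldl_insert_add_one]

lemma pvCdict_snoc (l : List Int) (x : Int) :
    pvCdict (l ++ [x]) = (pvCdict l).insert x ((pvCdict l).getD x 0 + 1) := by
  simp [pvCdict, List.foldl_append]

-- the triples contributed for a fixed pair (i, j)
def pvChunk (num : List Int) (req a : Int) (j : Int) : List (List Int) :=
  List.replicate ((num.drop (j + 1).toNat).count (req - a - PySem.List.pyGetD num j 0))
    [a, PySem.List.pyGetD num j 0, req - a - PySem.List.pyGetD num j 0]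

-- the common normal form both programs are reduced to
def pvCommon (num : List Int) (req : Int) : List (List Int) :=
  (PySem.List.pyRange 0 (PySem.List.len num - 2)).foldl (fun res i =>
    res ++ (PySem.List.pyRange (i + 1) (PySem.List.len num)).flatMap
      (pvChunk num req (PySem.List.pyGetD num i 0))) []

lemma pvKloop (a b req : Int) (l : List Int) (acc : List (List Int)) :
    l.foldl (fun li c => if a + b + c = req then li ++ [[a, b, c]] else li) acc
      = acc ++ List.replicate (l.count (req - a - b)) [a, b, req - a - b] := by
  induction l generalizing acc with
  | nil => simp
  | cons c l ih =>
    rw [List.foldl_cons, ih]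
    by_cases h : a + b + c = req
    · have hc : c = req - a - b := by omega
      simp [hc, List.replicate_succ]
    · have hc : ¬ c = req - a - b := by omega
      simp [h, hc]

lemma pvKloop' (num : List Int) (A B req : Int) (m : Int) (hm : 0 ≤ m) (li : List (List Int)) :
    (PySem.List.pyRange m (PySem.List.len num)).foldl
      (fun li k => if A + B + PySem.List.pyGetD num k 0 = req
        then li ++ [[A, B, PySem.List.pyGetD num k 0]] else li) li
    = li ++ List.replicate ((num.drop m.toNat).count (req - A - B)) [A, B, req - A - B] :=
  (PySem.List.foldl_pyRange_pyGetD num 0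
      (fun li c => if A + B + c = req then li ++ [[A, B, c]] else li) li hm).trans
    (pvKloop A B req (num.drop m.toNat) li)

lemma pvA_eq (num : List Int) (req : Int) : sum_num num req = pvCommon num req := by
  unfold sum_num pvCommon
  refine PySem.List.foldl_congr_mem _ _ _ _ ?_
  intro acc i hi
  have hi' := (PySem.List.mem_pyRange_one).1 hi
  have h1 : (PySem.List.pyRange (i + 1) (PySem.List.len num)).foldl
      (fun li j => (PySem.List.pyRange (j + 1) (PySem.List.len num)).foldl
        (fun li k => if PySem.List.pyGetD num i 0 + PySem.List.pyGetD num j 0 + PySem.List.pyGetD num k 0 = req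
          then li ++ [[PySem.List.pyGetD num i 0, PySem.List.pyGetD num j 0, PySem.List.pyGetD num k 0]]
          else li) li) acc
      = (PySem.List.pyRange (i + 1) (PySem.List.len num)).foldl
        (fun li j => li ++ pvChunk num req (PySem.List.pyGetD num i 0) j) acc := by
    refine PySem.List.foldl_congr_mem _ _ _ _ ?_
    intro acc2 j hj
    have hj' := (PySem.List.mem_pyRange_one).1 hj
    exact pvKloop' num (PySem.List.pyGetD num i 0) (PySem.List.pyGetD num j 0) req (j + 1)
      (by omega) acc2
  rw [h1, PySem.List.foldl_append_eq_flatMap]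

lemma pvBinner (num : List Int) (req a : Int) (lo : Int) (hlo : -1 ≤ lo) :
    ∀ (m : Nat) (hi : Int) (seg : List (List Int)), hi = lo + m → hi < (num.length : Int) →
      (PySem.List.pyRange hi lo (-1)).foldl
        (fun (st : PySem.Dict Int Int × List (List Int)) j =>
          (st.1.insert (PySem.List.pyGetD num j 0) (st.1.getD (PySem.List.pyGetD num j 0) 0 + 1),
           List.replicate (st.1.getD (req - a - PySem.List.pyGetD num j 0) 0).toNat
               [a, PySem.List.pyGetD num j 0, req - a - PySem.List.pyGetD num j 0]
             ++ st.2))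
        (pvCdict ((num.drop (hi + 1).toNat).reverse), seg)
      = (pvCdict ((num.drop (lo + 1).toNat).reverse),
         ((PySem.List.pyRange (lo + 1) (hi + 1)).flatMap (pvChunk num req a)) ++ seg) := by
  intro m
  induction m with
  | zero =>
    intro hi seg hhi hlen
    have h0 : hi = lo := by omega
    subst h0
    rw [PySem.List.pyRange_neg_one_eq_nil (le_refl hi), PySem.List.pyRange_one_eq_nil (by omega)]
    simp
  | succ m ih =>
    intro hi seg hhi hlen
    have hlt : lo < hi := by omega
    rw [PySem.List.pyRange_neg_one_cons hlt, List.foldl_cons]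
    have h0 : (0:Int) ≤ hi := by omega
    have hltl : hi.toNat < num.length := by omega
    have hb : PySem.List.pyGetD num hi 0 = num[hi.toNat] :=
      PySem.List.pyGetD_eq_getElem num 0 h0 hlen
    have hsucc : (hi + 1).toNat = hi.toNat + 1 := by omega
    have hdrop : num.drop hi.toNat = num[hi.toNat] :: num.drop (hi.toNat + 1) :=
      List.drop_eq_getElem_cons hltl
    -- the dict after this step is the counter of the one-longer suffix
    have hdict : (pvCdict ((num.drop (hi + 1).toNat).reverse)).insert (PySem.List.pyGetD num hi 0)
          ((pvCdict ((num.drop (hi + 1).toNat).reverse)).getD (PySem.List.pyGetD num hi 0) 0 + 1)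
        = pvCdict ((num.drop ((hi - 1) + 1).toNat).reverse) := by
      have : (hi - 1) + 1 = hi := by ring
      rw [this, ← pvCdict_snoc, hb]
      congr 1
      rw [hsucc, hdrop, List.reverse_cons]
    -- the chunk prepended by this step
    have hseg : List.replicate
          ((pvCdict ((num.drop (hi + 1).toNat).reverse)).getD
            (req - a - PySem.List.pyGetD num hi 0) 0).toNat
          [a, PySem.List.pyGetD num hi 0, req - a - PySem.List.pyGetD num hi 0]
        = pvChunk num req a hi := by
      rw [pvCdict_getD, List.count_reverse, Int.toNat_natCast, pvChunk]
    rw [show ((pvCdict ((num.drop (hi + 1).toNat).reverse)).insert (PySem.List.pyGetD num hi 0)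
          ((pvCdict ((num.drop (hi + 1).toNat).reverse)).getD (PySem.List.pyGetD num hi 0) 0 + 1),
          List.replicate ((pvCdict ((num.drop (hi + 1).toNat).reverse)).getD
            (req - a - PySem.List.pyGetD num hi 0) 0).toNat
            [a, PySem.List.pyGetD num hi 0, req - a - PySem.List.pyGetD num hi 0]
            ++ seg)
        = (pvCdict ((num.drop ((hi - 1) + 1).toNat).reverse), pvChunk num req a hi ++ seg) by
          rw [hdict, hseg]]
    rw [ih (hi - 1) (pvChunk num req a hi ++ seg) (by omega) (by omega)]
    have hr : (hi - 1) + 1 = hi := by ring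
    rw [hr]
    have hsplit : PySem.List.pyRange (lo + 1) (hi + 1) = PySem.List.pyRange (lo + 1) hi ++ [hi] :=
      PySem.List.pyRange_one_succ_right (by omega)
    rw [hsplit, List.flatMap_append, List.flatMap_singleton, List.append_assoc]

lemma pvB_eq (num : List Int) (req : Int) : sum_num_alt num req = pvCommon num req := by
  unfold sum_num_alt pvCommon
  refine PySem.List.foldl_congr_mem _ _ _ _ ?_
  intro acc i hi
  have hi' := (PySem.List.mem_pyRange_one).1 hi
  have hlen : PySem.List.len num = (num.length : Int) := by simp [PySem.List.len_eq]
  have hstart : PySem.Dict.empty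
      = pvCdict ((num.drop ((PySem.List.len num - 1) + 1).toNat).reverse) := by
    rw [hlen]
    have : ((num.length : Int) - 1 + 1).toNat = num.length := by omega
    rw [this, List.drop_length, List.reverse_nil]
    rfl
  rw [hstart, pvBinner num req (PySem.List.pyGetD num i 0) i (by omega)
      ((PySem.List.len num - 1 - i).toNat) (PySem.List.len num - 1) []
      (by rw [hlen] at hi' ⊢; omega) (by rw [hlen] at hi' ⊢; omega)]
  have h2 : PySem.List.len num - 1 + 1 = PySem.List.len num := by ring
  rw [h2, List.append_nil]

-- ===== VERDICT (by name: the statement is the Claim_ definition above) =====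
theorem sum_num_spec : Claim_equal_sum_num := by
  intro num req_sum _
  exact (pvA_eq num req_sum).trans (pvB_eq num req_sum).symm
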